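-- pv_equiv track=rewrite | github.com/AayushiKumar01/Networking | util.py | sum_words_in_packet
-- ===== SOURCE A (Python) =====
-- def sum_words_in_packet(packet):
--   """
--   Given a packet in Bytes, groups the bytes into words (2 bytes) and adds them to calculate the total sum of the packet
--
--   Args
--     Packet in bytes
--
--   Returns
--     A binary string representation of the sum of bits in the packet grouped into 16 bit word
--   """
--   packet_array = list(packet)
--   sum = 0
--   for i in range(0,len(packet_array),2):
--     w1 = packet_array[i] & 0xFF
--     w1 = w1 << 8
--     w2 = 0
--     if i + 1 < len(packet_array):
--       w2 = packet_array[i+1] & 0xFF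
--       sum += w1 + w2
--
--   ## substringing because bin() returns string with 0b prefixed
--   sum = bin(sum)[2:]
--   return sum
-- ===== SOURCE B (Python) =====
-- def sum_words_in_packet(packet):
--   b = list(packet)
--   if len(b) % 2:
--     b = b[:-1]
--   hi = sum(x & 0xFF for i, x in enumerate(b) if i % 2 == 0)
--   lo = sum(x & 0xFF for i, x in enumerate(b) if i % 2 == 1)
--   return bin(256 * hi + lo)[2:]
-- ===== Notes on version B (the rewrite author's own statement) =====
-- stated objective: alternative
-- what changed: Replaces the interleaved pairing loop (per-word shift-and-add with an in-loop bounds check) by two independent parity-filtered byte sums over the even-length prefix, combined once as 256*hi+lo.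
import Mathlib
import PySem

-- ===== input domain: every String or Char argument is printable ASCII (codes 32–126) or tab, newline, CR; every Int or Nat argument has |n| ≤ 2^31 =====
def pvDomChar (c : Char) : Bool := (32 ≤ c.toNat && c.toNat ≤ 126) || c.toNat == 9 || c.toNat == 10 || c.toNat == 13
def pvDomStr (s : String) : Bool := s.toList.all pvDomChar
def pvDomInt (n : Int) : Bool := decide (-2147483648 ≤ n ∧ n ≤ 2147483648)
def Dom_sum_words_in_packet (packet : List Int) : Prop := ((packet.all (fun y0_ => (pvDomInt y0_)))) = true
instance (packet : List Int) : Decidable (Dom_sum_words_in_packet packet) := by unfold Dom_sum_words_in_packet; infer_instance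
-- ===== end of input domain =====

-- B replaces A's interleaved pairing loop by two independent parity-filtered byte sums
-- over the even-length prefix, combined once as 256*hi+lo (objective: alternative).

-- ===== PORT A =====
-- literal port of A: one loop over range(0, len, 2), per-word shift-and-add, bin(sum)[2:]
def sum_words_in_packet (packet : List Int) : String :=
  let packet_array := packet
  let n : Int := (packet_array.length : Int)
  let s : Int :=
    (PySem.List.pyRange 0 n 2).foldl (fun sum i =>
      let w1 := PySem.Int.band (PySem.List.pyGetD packet_array i 0) 255
      let w1 := w1 <<< (8 : Nat)
      if i + 1 < n then
        let w2 := PySem.Int.band (PySem.List.pyGetD packet_array (i + 1) 0) 255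
        sum + (w1 + w2)
      else sum) 0
  String.mk (PySem.Chars.slice (PySem.Int.pyBin s).toList (some 2) none)

-- ===== PORT B =====
-- literal port of B: drop a trailing odd byte, two parity-filtered sums over enumerate, 256*hi+lo
def sum_words_in_packet_alt (packet : List Int) : String :=
  let b0 := packet
  let b := if PySem.Int.mod (b0.length : Int) 2 ≠ 0 then PySem.List.slice b0 none (some (-1)) else b0
  let hi : Int := (PySem.List.enumerate b 0).foldl
    (fun acc p => if PySem.Int.mod p.1 2 = 0 then acc + PySem.Int.band p.2 255 else acc) 0
  let lo : Int := (PySem.List.enumerate b 0).foldl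
    (fun acc p => if PySem.Int.mod p.1 2 = 1 then acc + PySem.Int.band p.2 255 else acc) 0
  String.mk (PySem.Chars.slice (PySem.Int.pyBin (256 * hi + lo)).toList (some 2) none)

-- ===== PRECONDITION & SPEC =====
def Spec_sum_words_in_packet (packet : List Int) (out : String) : Prop := out = sum_words_in_packet_alt packet
instance (packet : List Int) (out : String) : Decidable (Spec_sum_words_in_packet packet out) := by unfold Spec_sum_words_in_packet; infer_instance

-- ===== CLAIM (what is proved, stated in full; the proofs are below) =====
def Claim_equal_sum_words_in_packet : Prop := ∀ (packet : List Int), Dom_sum_words_in_packet packet → Spec_sum_words_in_packet packet (sum_words_in_packet packet)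

-- ===== LEMMAS AND PROOFS =====

-- common reference value: the 16-bit-word sum, two bytes at a time
def pvPairSum : List Int → Int
  | x :: y :: r => 256 * PySem.Int.band x 255 + PySem.Int.band y 255 + pvPairSum r
  | _ => 0

-- A's loop body at word index k, as a pure function
def pvFA (l : List Int) (k : Nat) : Int :=
  if (2 * (k : Int)) + 1 < (l.length : Int) then
    256 * PySem.Int.band (PySem.List.pyGetD l (2 * (k : Int)) 0) 255
      + PySem.Int.band (PySem.List.pyGetD l (2 * (k : Int) + 1) 0) 255
  else 0

lemma pvShift8 (a : Int) : a <<< (8 : Nat) = 256 * a := by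
  simp [Int.shiftLeft_eq]; ring

lemma pvModTwo (a : Int) : PySem.Int.mod a 2 = a % 2 :=
  PySem.Int.mod_eq_emod_of_pos (by norm_num)

-- A's fold equals the sum of pvFA over the range of word indices
lemma pvA_as_sum (l : List Int) :
    (PySem.List.pyRange 0 (l.length : Int) 2).foldl (fun sum i =>
      if i + 1 < (l.length : Int) then
        sum + (PySem.Int.band (PySem.List.pyGetD l i 0) 255 <<< (8 : Nat)
          + PySem.Int.band (PySem.List.pyGetD l (i + 1) 0) 255)
      else sum) 0
    = ((List.range (if (0:Int) < (l.length : Int) then ((((l.length : Int)) + 1) / 2).toNat else 0)).map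
        (pvFA l)).sum := by
  rw [PySem.List.pyRange_of_pos 0 (l.length : Int) (by norm_num)]
  rw [List.foldl_map]
  have hbody : (fun (sum : Int) (k : Nat) =>
      if (0 + 2 * (k : Int)) + 1 < (l.length : Int) then
        sum + (PySem.Int.band (PySem.List.pyGetD l (0 + 2 * (k : Int)) 0) 255 <<< (8 : Nat)
          + PySem.Int.band (PySem.List.pyGetD l ((0 + 2 * (k : Int)) + 1) 0) 255)
      else sum)
      = fun (sum : Int) (k : Nat) => sum + pvFA l k := by
    funext sum k
    simp only [pvFA, pvShift8, zero_add]
    split <;> ring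
  rw [show ((l.length : Int) - 0 + 2 - 1) = ((l.length : Int) + 1) by ring]
  rw [hbody, PySem.List.foldl_add]
  simp

lemma pvCount_cons_cons (m : Nat) :
    (if (0:Int) < ((m + 2 : Nat) : Int) then ((((m + 2 : Nat) : Int) + 1) / 2).toNat else 0)
    = (if (0:Int) < ((m : Nat) : Int) then ((((m : Nat) : Int) + 1) / 2).toNat else 0) + 1 := by
  rcases Nat.eq_zero_or_pos m with h | h
  · subst h; norm_num
  · have h1 : (0:Int) < ((m + 2 : Nat) : Int) := by push_cast; omega
    have h2 : (0:Int) < ((m : Nat) : Int) := by exact_mod_cast h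
    rw [if_pos h1, if_pos h2]
    push_cast
    omega

lemma pvFA_cons_cons (x y : Int) (r : List Int) (k : Nat) :
    pvFA (x :: y :: r) (k + 1) = pvFA r k := by
  have hB : (2 * ((k + 1 : Nat) : Int) + 1) = ((2 * k + 3 : Nat) : Int) := by push_cast; ring
  have hA : (2 * ((k + 1 : Nat) : Int)) = ((2 * k + 2 : Nat) : Int) := by push_cast; ring
  have hD : (2 * ((k : Nat) : Int) + 1) = ((2 * k + 1 : Nat) : Int) := by push_cast; ring
  have hC : (2 * ((k : Nat) : Int)) = ((2 * k : Nat) : Int) := by push_cast; ring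
  unfold pvFA
  rw [hB, hA, hD, hC]
  simp only [PySem.List.pyGetD_natCast, List.length_cons, Nat.cast_lt]
  have hiff : (2 * k + 3 < r.length + 1 + 1) = (2 * k + 1 < r.length) := by
    apply propext; omega
  have e1 : (x :: y :: r).getD (2 * k + 2) 0 = r.getD (2 * k) 0 := by
    rw [show 2 * k + 2 = (2 * k + 1) + 1 by omega, List.getD_cons_succ, List.getD_cons_succ]
  have e2 : (x :: y :: r).getD (2 * k + 3) 0 = r.getD (2 * k + 1) 0 := by
    rw [show 2 * k + 3 = ((2 * k + 1) + 1) + 1 by omega, List.getD_cons_succ,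
        List.getD_cons_succ]
  simp only [hiff, e1, e2]

-- the sum of pvFA over the word-index range is pvPairSum of the list
lemma pvA_sum_eq_pairSum : ∀ (l : List Int),
    ((List.range (if (0:Int) < (l.length : Int) then ((((l.length : Int)) + 1) / 2).toNat else 0)).map
        (pvFA l)).sum = pvPairSum l
  | [] => by norm_num [pvPairSum]
  | [x] => by
    have h0 : pvFA [x] 0 = 0 := by
      unfold pvFA
      rw [if_neg (by norm_num)]
    norm_num [h0]
    rfl
  | x :: y :: r => by
    have ih := pvA_sum_eq_pairSum r
    have hlen : (((x :: y :: r).length : Nat) : Int) = ((r.length + 2 : Nat) : Int) := by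
      simp only [List.length_cons]
    rw [hlen, pvCount_cons_cons r.length, List.range_succ_eq_map]
    rw [List.map_cons, List.sum_cons, List.map_map]
    have h0 : pvFA (x :: y :: r) 0 = 256 * PySem.Int.band x 255 + PySem.Int.band y 255 := by
      unfold pvFA
      rw [if_pos (by simp only [List.length_cons]; push_cast; omega)]
      norm_num [PySem.List.pyGetD_ofNat']
    have hmap : (List.range (if (0:Int) < ((r.length : Nat) : Int) then ((((r.length : Nat) : Int) + 1) / 2).toNat else 0)).map
        (pvFA (x :: y :: r) ∘ Nat.succ) = (List.range (if (0:Int) < ((r.length : Nat) : Int) then ((((r.length : Nat) : Int) + 1) / 2).toNat else 0)).map (pvFA r) := by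
      apply List.map_congr_left
      intro k _
      simpa [Nat.succ_eq_add_one] using pvFA_cons_cons x y r k
    rw [hmap, ih, h0]
    show _ = pvPairSum (x :: y :: r)
    rw [pvPairSum]

-- B's fold bodies, as pure functions
def pvG (p : Int) (q : Int × Int) : Int :=
  if PySem.Int.mod q.1 2 = p then PySem.Int.band q.2 255 else 0

lemma pvB_fold_as_sum (p : Int) (b : List Int) (s : Int) :
    (PySem.List.enumerate b s).foldl
      (fun acc q => if PySem.Int.mod q.1 2 = p then acc + PySem.Int.band q.2 255 else acc) 0
    = ((PySem.List.enumerate b s).map (pvG p)).sum := by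
  have hbody : (fun (acc : Int) (q : Int × Int) =>
      if PySem.Int.mod q.1 2 = p then acc + PySem.Int.band q.2 255 else acc)
      = fun acc q => acc + pvG p q := by
    funext acc q; simp only [pvG]; split <;> ring
  rw [hbody, PySem.List.foldl_add]; simp

-- for an even-length list and an even start, 256*hi-sum + lo-sum is pvPairSum
lemma pvB_sum_eq_pairSum : ∀ (b : List Int), b.length % 2 = 0 → ∀ (s : Int), PySem.Int.mod s 2 = 0 →
    256 * ((PySem.List.enumerate b s).map (pvG 0)).sum + ((PySem.List.enumerate b s).map (pvG 1)).sum
    = pvPairSum b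
  | [], _, _, _ => by simp [pvPairSum]
  | [x], h, _, _ => by simp at h
  | x :: y :: r, h, s, hs => by
    have hr : r.length % 2 = 0 := by
      simp only [List.length_cons] at h; omega
    have hs' : s % 2 = 0 := by rw [pvModTwo] at hs; exact hs
    have h1 : PySem.Int.mod (s + 1) 2 = 1 := by
      rw [pvModTwo]; omega
    have h2 : PySem.Int.mod (s + 1 + 1) 2 = 0 := by
      rw [pvModTwo]; omega
    have ih := pvB_sum_eq_pairSum r hr (s + 1 + 1) h2
    rw [PySem.List.enumerate_cons, PySem.List.enumerate_cons]
    simp only [List.map_cons, List.sum_cons]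
    have g00 : pvG 0 (s, x) = PySem.Int.band x 255 := by
      simp only [pvG]; rw [if_pos hs]
    have g01 : pvG 0 (s + 1, y) = 0 := by
      simp only [pvG]; rw [if_neg (by rw [pvModTwo]; omega)]
    have g10 : pvG 1 (s, x) = 0 := by
      simp only [pvG]; rw [if_neg (by rw [pvModTwo]; omega)]
    have g11 : pvG 1 (s + 1, y) = PySem.Int.band y 255 := by
      simp only [pvG]; rw [if_pos h1]
    rw [g00, g01, g10, g11]
    rw [show pvPairSum (x :: y :: r)
        = 256 * PySem.Int.band x 255 + PySem.Int.band y 255 + pvPairSum r from rfl]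
    rw [← ih]
    ring

-- dropping the last element of an odd-length list, as B does, matches pvPairSum of the whole list
lemma pvPairSum_dropLast : ∀ (l : List Int), l.length % 2 = 1 → pvPairSum l.dropLast = pvPairSum l
  | [], h => by simp at h
  | [x], _ => by simp [pvPairSum]
  | [x, y], h => by simp at h
  | x :: y :: z :: r, h => by
    have hr : (z :: r).length % 2 = 1 := by
      simp only [List.length_cons] at h ⊢; omega
    have ih := pvPairSum_dropLast (z :: r) hr
    show pvPairSum (x :: y :: (z :: r).dropLast) = pvPairSum (x :: y :: z :: r)
    rw [show pvPairSum (x :: y :: (z :: r).dropLast)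
        = 256 * PySem.Int.band x 255 + PySem.Int.band y 255 + pvPairSum (z :: r).dropLast from rfl]
    rw [show pvPairSum (x :: y :: z :: r)
        = 256 * PySem.Int.band x 255 + PySem.Int.band y 255 + pvPairSum (z :: r) from rfl]
    omega

-- ===== VERDICT (by name: the statement is the Claim_ definition above) =====
theorem sum_words_in_packet_spec : Claim_equal_sum_words_in_packet := by
  intro packet _
  unfold Spec_sum_words_in_packet
  simp only [sum_words_in_packet, sum_words_in_packet_alt]
  rw [pvA_as_sum packet, pvA_sum_eq_pairSum packet]
  by_cases hpar : packet.length % 2 = 0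
  · have hmod : PySem.Int.mod ((packet.length : Nat) : Int) 2 = 0 := by
      rw [pvModTwo]; omega
    rw [if_neg (not_not_intro hmod)]
    rw [pvB_fold_as_sum 0, pvB_fold_as_sum 1,
        pvB_sum_eq_pairSum packet hpar 0 (by decide)]
  · have hodd : packet.length % 2 = 1 := by omega
    have hmod : ¬ PySem.Int.mod ((packet.length : Nat) : Int) 2 = 0 := by
      rw [pvModTwo]; omega
    rw [if_pos hmod]
    rw [PySem.List.slice_to_neg_one]
    have hlen : packet.dropLast.length % 2 = 0 := by
      rw [List.length_dropLast]; omega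
    rw [pvB_fold_as_sum 0, pvB_fold_as_sum 1,
        pvB_sum_eq_pairSum packet.dropLast hlen 0 (by decide),
        pvPairSum_dropLast packet hodd]
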